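-- pv_equiv track=rewrite | github.com/NomerColi/Python-Classes | ProjectStrings.py | get_vowel_capitialized_name
-- ===== SOURCE A (Python) =====
-- vowels = "aeiou"
--
-- def contains(text, char):
--     return text.lower().find(char.lower()) != -1
--
-- def is_vowel(char):
--     return contains(vowels, char)
--
-- def get_vowel_capitialized_name(text):
--     capitalizedName = ""
--     for c in text:
--         if is_vowel(c):
--             capitalizedName += c.upper()
--         else:
--             capitalizedName += c.lower()
--     return capitalizedName
-- ===== SOURCE B (Python) =====
-- _TABLE = str.maketrans("aeiou", "AEIOU")
--
-- def get_vowel_capitialized_name(text):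
--     return text.lower().translate(_TABLE)
-- ===== Notes on version B (the rewrite author's own statement) =====
-- stated objective: idiomatic
-- what changed: Replaces the per-character loop with is_vowel/contains substring search by a single text.lower().translate() over a precomputed maketrans table, eliminating the explicit loop and helper functions.
import Mathlib
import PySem

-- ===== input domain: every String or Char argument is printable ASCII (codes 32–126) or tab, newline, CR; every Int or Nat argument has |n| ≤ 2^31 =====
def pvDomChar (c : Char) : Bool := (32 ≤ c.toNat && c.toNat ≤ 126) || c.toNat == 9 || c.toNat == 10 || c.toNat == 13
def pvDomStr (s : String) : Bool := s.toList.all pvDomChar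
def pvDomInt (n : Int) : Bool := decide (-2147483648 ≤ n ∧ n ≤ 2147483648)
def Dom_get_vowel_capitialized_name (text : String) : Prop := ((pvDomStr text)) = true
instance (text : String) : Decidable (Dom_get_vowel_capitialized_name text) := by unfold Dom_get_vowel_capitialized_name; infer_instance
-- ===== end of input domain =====

-- B replaces A's per-character is_vowel loop by lower() and a precomputed translation table (one table-driven pass); return value only, no mutation.

-- ===== PORT A =====
-- vowels = "aeiou"
def pvVowels : List Char := "aeiou".toList

-- contains(text, char): text.lower().find(char.lower()) != -1
def pvContains (text char : List Char) : Bool :=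
  PySem.Chars.find (PySem.Chars.lower text) (PySem.Chars.lower char) != -1

-- is_vowel(char): contains(vowels, char)
def pvIsVowel (char : List Char) : Bool := pvContains pvVowels char

-- the loop: capitalizedName += c.upper() / c.lower()  (c is a one-character string)
def get_vowel_capitialized_name (text : String) : String :=
  String.mk (text.toList.foldl
    (fun acc c =>
      if pvIsVowel [c] then acc ++ PySem.Chars.upper [c]
      else acc ++ PySem.Chars.lower [c]) [])

-- ===== PORT B =====
-- str.maketrans("aeiou", "AEIOU") as an association table
def pvTable : List (Char × Char) := [('a','A'),('e','E'),('i','I'),('o','O'),('u','U')]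

-- text.lower().translate(_TABLE)
def get_vowel_capitialized_name_alt (text : String) : String :=
  String.mk ((PySem.Chars.lower text.toList).map (fun c => (pvTable.lookup c).getD c))

-- ===== PRECONDITION & SPEC =====
def Spec_get_vowel_capitialized_name (text : String) (out : String) : Prop := out = get_vowel_capitialized_name_alt text
instance (text : String) (out : String) : Decidable (Spec_get_vowel_capitialized_name text out) := by unfold Spec_get_vowel_capitialized_name; infer_instance

-- ===== CLAIM (what is proved, stated in full; the proofs are below) =====
def Claim_equal_get_vowel_capitialized_name : Prop := ∀ (text : String), Dom_get_vowel_capitialized_name text → Spec_get_vowel_capitialized_name text (get_vowel_capitialized_name text)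

-- ===== LEMMAS AND PROOFS =====

-- per-character agreement of the two passes, checked over the whole ASCII domain
lemma pv_step_char (c : Char) (h : pvDomChar c = true) :
    (if pvIsVowel [c] then PySem.Chars.upper [c] else PySem.Chars.lower [c])
      = [(pvTable.lookup (PySem.Chars.lowerChar c)).getD (PySem.Chars.lowerChar c)] := by
  have hv : c.toNat < 128 := by
    simp only [pvDomChar, Bool.or_eq_true, Bool.and_eq_true, decide_eq_true_eq, beq_iff_eq] at h
    omega
  have hall : ∀ n : Nat, n < 128 →
      (if pvIsVowel [Char.ofNat n] then PySem.Chars.upper [Char.ofNat n] else PySem.Chars.lower [Char.ofNat n])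
        = [(pvTable.lookup (PySem.Chars.lowerChar (Char.ofNat n))).getD (PySem.Chars.lowerChar (Char.ofNat n))] := by
    decide
  have hc : Char.ofNat c.toNat = c := Char.ofNat_toNat c
  have := hall c.toNat hv
  rwa [hc] at this

lemma pv_key (l : List Char) (acc : List Char) (h : l.all pvDomChar = true) :
    l.foldl (fun acc c =>
        if pvIsVowel [c] then acc ++ PySem.Chars.upper [c]
        else acc ++ PySem.Chars.lower [c]) acc
      = acc ++ (PySem.Chars.lower l).map (fun c => (pvTable.lookup c).getD c) := by
  induction l generalizing acc with
  | nil => simp [PySem.Chars.lower]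
  | cons c t ih =>
    simp only [List.all_cons, Bool.and_eq_true] at h
    have hstep := pv_step_char c h.1
    have hl : PySem.Chars.lower (c :: t) = PySem.Chars.lowerChar c :: PySem.Chars.lower t := by
      simp [PySem.Chars.lower]
    rw [List.foldl_cons, ih _ h.2, hl]
    by_cases hvc : pvIsVowel [c] = true <;>
      simp [hvc] at hstep ⊢ <;> simp [hstep]

lemma pv_main (l : List Char) (h : l.all pvDomChar = true) :
    l.foldl (fun acc c =>
        if pvIsVowel [c] then acc ++ PySem.Chars.upper [c]
        else acc ++ PySem.Chars.lower [c]) []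
      = (PySem.Chars.lower l).map (fun c => (pvTable.lookup c).getD c) := by
  simpa using pv_key l [] h

-- ===== VERDICT (by name: the statement is the Claim_ definition above) =====
theorem get_vowel_capitialized_name_spec : Claim_equal_get_vowel_capitialized_name := by
  intro text hdom
  unfold Spec_get_vowel_capitialized_name get_vowel_capitialized_name get_vowel_capitialized_name_alt
  have h : text.toList.all pvDomChar = true := hdom
  rw [pv_main _ h]
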